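-- pv_equiv track=rewrite | github.com/Morikunmev/PythonLVLEstructurado | 1 Funciones/Ejercicios variados/funciones retorno de una lista 28.py | PrecioMayor
-- ===== SOURCE A (Python) =====
-- def PrecioMayor(n):
--     mayor = 0
--     repetidos = []
--     for i, precio in enumerate(n):
--         if precio>mayor:
--             mayor = precio
--         elif precio == mayor:
--             repetidos.append(precio)
--     repetidos.append(mayor)
--     return mayor, repetidos
-- ===== SOURCE B (Python) =====
-- def PrecioMayor(n):
--     # table of running records: prefs[i] = max(0, max(n[:i]))
--     prefs = [0]
--     for p in n:
--         prefs.append(prefs[-1] if prefs[-1] >= p else p)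
--     repetidos = [p for p, m in zip(n, prefs) if p == m]
--     repetidos.append(prefs[-1])
--     return prefs[-1], repetidos
-- ===== Notes on version B (the rewrite author's own statement) =====
-- stated objective: alternative
-- what changed: Replaces A's single running-state scan with conditional branches by a prefix-record table built first, then a separate zip-filter pass collecting elements that tie the record seen before them.
import Mathlib
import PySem

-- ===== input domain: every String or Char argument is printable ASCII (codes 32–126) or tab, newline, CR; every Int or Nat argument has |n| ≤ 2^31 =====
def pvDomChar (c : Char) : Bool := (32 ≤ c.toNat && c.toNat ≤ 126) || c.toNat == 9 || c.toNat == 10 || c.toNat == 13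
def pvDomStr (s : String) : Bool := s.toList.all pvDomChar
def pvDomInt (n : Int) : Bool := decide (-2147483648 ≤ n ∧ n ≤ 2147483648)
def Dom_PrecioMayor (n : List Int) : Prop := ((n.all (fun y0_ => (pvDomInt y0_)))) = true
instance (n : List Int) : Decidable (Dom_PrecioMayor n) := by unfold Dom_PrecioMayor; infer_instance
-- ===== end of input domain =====

-- ===== PORT A =====
-- A: single scan with running record `mayor`, collecting ties into `repetidos`
def PrecioMayor (n : List Int) : Int × List Int :=
  let res := (PySem.List.enumerate n).foldl
    (fun (st : Int × List Int) (ip : Int × Int) =>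
      if ip.2 > st.1 then (ip.2, st.2)
      else if ip.2 == st.1 then (st.1, st.2 ++ [ip.2])
      else st) (0, [])
  (res.1, res.2 ++ [res.1])

-- ===== PORT B =====
-- B: build the prefix-record table (prefs[-1] if prefs[-1] >= p else p), then filter by zip
def PrecioMayor_alt (n : List Int) : Int × List Int :=
  let prefs := List.scanl (fun cur p => if cur ≥ p then cur else p) 0 n
  let last := prefs.getLastD 0
  let repetidos := ((n.zip prefs).filter (fun pm => pm.1 == pm.2)).map Prod.fst
  (last, repetidos ++ [last])

-- ===== PRECONDITION & SPEC =====
def Spec_PrecioMayor (n : List Int) (out : Int × List Int) : Prop := out = PrecioMayor_alt n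
instance (n : List Int) (out : Int × List Int) : Decidable (Spec_PrecioMayor n out) := by unfold Spec_PrecioMayor; infer_instance

-- ===== CLAIM (what is proved, stated in full; the proofs are below) =====
def Claim_equal_PrecioMayor : Prop := ∀ (n : List Int), Dom_PrecioMayor n → Spec_PrecioMayor n (PrecioMayor n)

-- ===== LEMMAS AND PROOFS =====

-- ===== VERDICT (by name: the statement is the Claim_ definition above) =====
def pvF (cur p : Int) : Int := if cur ≥ p then cur else p

theorem pv_scanl_last (n : List Int) : ∀ (m d : Int),
    (List.scanl pvF m n).getLastD d = n.foldl pvF m := by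
  induction n with
  | nil => intro m d; simp
  | cons p t ih => intro m d; rw [List.scanl_cons, List.getLastD_cons, ih, List.foldl_cons]

theorem pv_loop (n : List Int) : ∀ (s : Int) (m : Int) (r : List Int),
    (PySem.List.enumerate n s).foldl
      (fun (st : Int × List Int) (ip : Int × Int) =>
        if ip.2 > st.1 then (ip.2, st.2)
        else if ip.2 == st.1 then (st.1, st.2 ++ [ip.2])
        else st) (m, r)
    = (n.foldl pvF m,
       r ++ ((n.zip (List.scanl pvF m n)).filter (fun pm => pm.1 == pm.2)).map Prod.fst) := by
  induction n with
  | nil => intro s m r; simp [PySem.List.enumerate]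
  | cons p t ih =>
      intro s m r
      rw [PySem.List.enumerate_cons]
      simp only [List.foldl_cons, List.scanl_cons, List.zip_cons_cons, List.filter_cons]
      by_cases h1 : p > m
      · have hf : pvF m p = p := by simp [pvF]; omega
        rw [if_pos h1, ih, hf, if_neg (by simp; omega : ¬ (((p, m).1 == (p, m).2) = true))]
      · by_cases h2 : p = m
        · subst h2
          have hf : pvF p p = p := by simp [pvF]
          rw [if_neg h1, if_pos (by simp), ih, hf]
          simp
        · have hf : pvF m p = m := by simp [pvF]; omega
          rw [if_neg h1, if_neg (by simp [h2]), ih, hf,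
            if_neg (by simp [h2] : ¬ (((p, m).1 == (p, m).2) = true))]

theorem PrecioMayor_spec : Claim_equal_PrecioMayor := by
  intro n _
  unfold Spec_PrecioMayor PrecioMayor PrecioMayor_alt
  rw [pv_loop n 0 0 []]
  simp only [show (fun cur p : Int => if cur ≥ p then cur else p) = pvF from rfl,
    pv_scanl_last n 0, List.nil_append]
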